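-- pv_equiv track=rewrite | github.com/tjresearch/research-oliver-hayman | Main.py | matBumperUp
-- ===== SOURCE A (Python) =====
-- def matBumperUp(x):
--   ret = []
--   for i in range(len(x)):
--     ret.append(x[i][:])
--   for k in range(len(x)):
--     prev = 0
--     current = 0
--     count = 0
--     for i in range(len(x[0])):
--       prev = current
--       current = x[k][i]
--       ret[k][i] = 0
--       if current != 0 and prev != 0:
--           count += 1
--       elif current == 0 and prev != 0:
--           for j in range(count):
--             ret[k][i-j-1] = j+1
--           count = 0
--       elif current != 0 and prev == 0:
--           count += 1
--     if current != 0: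
--       for j in range(count):
--           ret[k][len(ret[0])-1-j] = j+1
--   return ret
-- ===== SOURCE B (Python) =====
-- def matBumperUp(x):
--   if not x:
--     return []
--   n = len(x[0])
--   ret = []
--   for row in x:
--     vals = []
--     c = 0
--     for v in reversed(row[:n]):
--       c = c + 1 if v != 0 else 0
--       vals.append(c)
--     ret.append(list(reversed(vals)) + row[n:])
--   return ret
-- ===== Notes on version B (the rewrite author's own statement) =====
-- stated objective: simpler
-- what changed: Replaces A's forward scan with state machine (prev/current/count) plus deferred inner write-back loops by a single backward pass per row that maintains the run-length-to-end counter directly and emits each label immediately.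
import Mathlib
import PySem

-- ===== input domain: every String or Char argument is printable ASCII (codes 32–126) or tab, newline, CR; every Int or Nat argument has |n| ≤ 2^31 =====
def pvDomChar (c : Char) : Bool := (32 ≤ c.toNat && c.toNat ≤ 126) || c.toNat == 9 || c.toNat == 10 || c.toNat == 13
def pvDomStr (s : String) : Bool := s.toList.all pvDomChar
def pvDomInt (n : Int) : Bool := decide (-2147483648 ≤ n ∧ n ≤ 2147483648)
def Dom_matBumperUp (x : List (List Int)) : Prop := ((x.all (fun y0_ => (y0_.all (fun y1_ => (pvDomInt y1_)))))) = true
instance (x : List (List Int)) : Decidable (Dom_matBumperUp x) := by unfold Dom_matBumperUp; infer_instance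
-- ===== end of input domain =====

-- B replaces A's forward scan with deferred write-backs by a single backward pass per row
-- that maintains the run length directly (objective: simpler).

-- ===== PORT A =====
-- writeback loop: for j in range(count): r[m-j-1] = j+1   (indices are in range on Pre_)
def pvWB (m : Nat) (count : Nat) (r : List Int) : List Int :=
  (List.range count).foldl (fun r2 j => r2.set (m - j - 1) ((j : Int) + 1)) r

-- one iteration of A's inner loop over column i (state: prev, current, count, ret-row);
-- x[k][i] is ported as row.getD i 0 — exact on Pre_ (i < len(row)), where Python does not raise
def pvAStep (row : List Int) (s : Int × Int × Nat × List Int) (i : Nat) : Int × Int × Nat × List Int :=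
  match s with
  | (_, current0, count, r) =>
    let prev := current0
    let current := row.getD i 0
    let r := r.set i 0
    if current ≠ 0 ∧ prev ≠ 0 then (prev, current, count + 1, r)
    else if current = 0 ∧ prev ≠ 0 then (prev, current, 0, pvWB i count r)
    else if current ≠ 0 ∧ prev = 0 then (prev, current, count + 1, r)
    else (prev, current, count, r)

-- the body of A's outer loop for row k
def pvARow (n : Nat) (row : List Int) : List Int :=
  match (List.range n).foldl (pvAStep row) (0, 0, 0, row) with
  | (_, current, count, r) => if current ≠ 0 then pvWB n count r else r

def matBumperUp (x : List (List Int)) : List (List Int) :=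
  let ret := x.map (fun r => r)          -- ret.append(x[i][:])
  let n := (x.headD []).length           -- len(x[0]); only read when the loop runs (x ≠ [])
  (List.range x.length).foldl (fun ret k => ret.set k (pvARow n (x.getD k []))) ret

-- ===== PORT B =====
-- one row of B: backward pass over row[:n] with a run counter, then reversed, plus row[n:]
def pvBRow (n : Nat) (row : List Int) : List Int :=
  let p := ((row.take n).reverse).foldl
    (fun (p : Int × List Int) v =>
      let c := if v ≠ 0 then p.1 + 1 else (0 : Int)
      (c, p.2 ++ [c])) ((0 : Int), ([] : List Int))
  p.2.reverse ++ row.drop n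

def matBumperUp_alt (x : List (List Int)) : List (List Int) :=
  match x with
  | [] => []
  | x0 :: _ => x.map (fun row => pvBRow x0.length row)

-- ===== PRECONDITION & SPEC =====
-- Pre_ excludes only inputs on which A raises IndexError: a row shorter than row 0.
def Pre_matBumperUp (x : List (List Int)) : Prop :=
  ∀ r ∈ x, (x.headD []).length ≤ r.length
instance (x : List (List Int)) : Decidable (Pre_matBumperUp x) := by unfold Pre_matBumperUp; infer_instance
def pvWitness_matBumperUp : List (List Int) := [[1, 2, 0, 3], [0, 5, 6, 7]]

def Spec_matBumperUp (x : List (List Int)) (out : List (List Int)) : Prop := out = matBumperUp_alt x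
instance (x : List (List Int)) (out : List (List Int)) : Decidable (Spec_matBumperUp x out) := by unfold Spec_matBumperUp; infer_instance

-- ===== CLAIM (what is proved, stated in full; the proofs are below) =====
def Claim_equal_matBumperUp : Prop := ∀ (x : List (List Int)), Dom_matBumperUp x → Pre_matBumperUp x → Spec_matBumperUp x (matBumperUp x)

-- ===== LEMMAS AND PROOFS =====

-- trailing-run length of a list (the value of A's `count` after scanning the list)
def pvTC (l : List Int) : Nat := l.foldl (fun c v => if v = 0 then 0 else c + 1) 0

-- run-length-to-end labelling, computed from the right with continuation counter s
def pvRT : List Int → Int → List Int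
  | [], _ => []
  | v :: t, s => (if v = 0 then 0 else (pvRT t s).headD s + 1) :: pvRT t s

-- [c, c-1, …, 1]
def pvDesc : Nat → List Int
  | 0 => []
  | c + 1 => ((c : Int) + 1) :: pvDesc c

theorem pvTC_append (l : List Int) (v : Int) :
    pvTC (l ++ [v]) = if v = 0 then 0 else pvTC l + 1 := by
  simp [pvTC, List.foldl_append]

theorem pvTC_le (l : List Int) : pvTC l ≤ l.length := by
  induction l using List.reverseRecOn with
  | nil => simp [pvTC]
  | append_singleton t v ih =>
    rw [pvTC_append]
    by_cases hv : v = 0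
    · simp [hv]
    · rw [if_neg hv]
      simp only [List.length_append, List.length_cons, List.length_nil]
      omega

theorem pvTC_zero_iff (l : List Int) : pvTC l = 0 ↔ l.getLastD 0 = 0 := by
  induction l using List.reverseRecOn with
  | nil => simp [pvTC]
  | append_singleton t v ih =>
    rw [pvTC_append]
    split <;> simp_all

theorem pvTC_boundary (l : List Int) : (l.take (l.length - pvTC l)).getLastD 0 = 0 := by
  induction l using List.reverseRecOn with
  | nil => simp
  | append_singleton t v ih =>
    rw [pvTC_append]
    by_cases hv : v = 0
    · rw [if_pos hv, hv, Nat.sub_zero, List.take_of_length_le (le_refl _)]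
      simp
    · rw [if_neg hv]
      have h := pvTC_le t
      have he : (t ++ [v]).length - (pvTC t + 1) = t.length - pvTC t := by
        simp only [List.length_append, List.length_cons, List.length_nil]
        omega
      rw [he, List.take_append_of_le_length (by omega)]
      exact ih

theorem pvTC_suffix_ne (l : List Int) : ∀ v ∈ l.drop (l.length - pvTC l), v ≠ 0 := by
  induction l using List.reverseRecOn with
  | nil => simp
  | append_singleton t v ih =>
    rw [pvTC_append]
    by_cases hv : v = 0
    · rw [if_pos hv, Nat.sub_zero, List.drop_of_length_le (le_refl _)]
      simp
    · rw [if_neg hv]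
      have h := pvTC_le t
      have he : (t ++ [v]).length - (pvTC t + 1) = t.length - pvTC t := by
        simp only [List.length_append, List.length_cons, List.length_nil]
        omega
      rw [he, List.drop_append_of_le_length (by omega)]
      intro w hw
      rcases List.mem_append.1 hw with hw | hw
      · exact ih w hw
      · simp_all

theorem pvRT_length (l : List Int) (s : Int) : (pvRT l s).length = l.length := by
  induction l with
  | nil => simp [pvRT]
  | cons v t ih => simp [pvRT, ih]

theorem pvRT_ne_nil {l : List Int} (h : l ≠ []) (s : Int) : pvRT l s ≠ [] := by
  cases l with
  | nil => simp at h
  | cons v t => simp [pvRT]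

-- splitting lemma: the labelling of a ++ b is the labelling of b, continued into a
theorem pvRT_append (a b : List Int) (s : Int) :
    pvRT (a ++ b) s = pvRT a ((pvRT b s).headD s) ++ pvRT b s := by
  induction a with
  | nil => simp [pvRT]
  | cons v t ih =>
    simp only [List.cons_append, pvRT, ih]
    congr 1
    congr 1
    cases t with
    | nil => simp [pvRT]
    | cons w u => simp [pvRT]

-- a list ending in 0 (or empty) does not see the continuation counter
theorem pvRT_of_last_zero (a : List Int) (h : a.getLastD 0 = 0) (s : Int) :
    pvRT a s = pvRT a 0 := by
  induction a with
  | nil => rfl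
  | cons v t ih =>
    cases t with
    | nil =>
      simp at h
      simp [pvRT, h]
    | cons w u =>
      have h' : (w :: u : List Int).getLastD 0 = 0 := by
        simpa [List.getLastD_cons] using h
      have hr := ih h'
      have hne : pvRT (w :: u) 0 ≠ [] := pvRT_ne_nil (by simp) 0
      obtain ⟨a, l, hcons⟩ : ∃ a l, pvRT (w :: u) 0 = a :: l := by
        cases hx : pvRT (w :: u) 0 with
        | nil => exact absurd hx hne
        | cons a l => exact ⟨a, l, rfl⟩
      calc pvRT (v :: w :: u) s
          = (if v = 0 then 0 else (pvRT (w :: u) s).headD s + 1) :: pvRT (w :: u) s := rfl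
        _ = (if v = 0 then 0 else (a :: l).headD s + 1) :: (a :: l) := by rw [hr, hcons]
        _ = (if v = 0 then 0 else (a :: l).headD 0 + 1) :: (a :: l) := by simp
        _ = pvRT (v :: w :: u) 0 := by
            rw [show pvRT (v :: w :: u) 0
                = (if v = 0 then 0 else (pvRT (w :: u) 0).headD 0 + 1) :: pvRT (w :: u) 0
              from rfl, hcons]

theorem pvRT_headD_desc (c : Nat) : (pvDesc c).headD 0 = (c : Int) := by
  cases c <;> simp [pvDesc]

theorem pvRT_all_ne (b : List Int) (h : ∀ v ∈ b, v ≠ 0) :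
    pvRT b 0 = pvDesc b.length := by
  induction b with
  | nil => rfl
  | cons v t ih =>
    have hv : v ≠ 0 := h v (by simp)
    have ht := ih (fun w hw => h w (by simp [hw]))
    simp only [pvRT, ht, hv, List.length_cons, pvDesc]
    rw [pvRT_headD_desc]
    simp

-- appending a zero extends the labelling by a zero
theorem pvRT_append_zero (a : List Int) (s : Int) :
    pvRT (a ++ [0]) s = pvRT a 0 ++ [0] := by
  rw [pvRT_append]
  simp [pvRT]

-- key characterisation of the labelling of a list with trailing-run length c
theorem pvRT_split (l : List Int) :
    pvRT l 0 = pvRT (l.take (l.length - pvTC l)) 0 ++ pvDesc (pvTC l) := by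
  set k := l.length - pvTC l with hk
  have hle : pvTC l ≤ l.length := pvTC_le l
  have hdec : l = l.take k ++ l.drop k := (List.take_append_drop k l).symm
  conv_lhs => rw [hdec]
  rw [pvRT_append]
  have hb : pvRT (l.drop k) 0 = pvDesc (pvTC l) := by
    rw [pvRT_all_ne _ (pvTC_suffix_ne l)]
    congr 1
    rw [List.length_drop]
    omega
  rw [hb, pvRT_of_last_zero _ (pvTC_boundary l)]

-- the write-back loop turns the zeroed run region into pvDesc
theorem pvWB_eq (c : Nat) : ∀ (m : Nat) (A B : List Int), A.length = m - c → c ≤ m →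
    pvWB m c (A ++ List.replicate c (0 : Int) ++ B) = A ++ pvDesc c ++ B := by
  induction c with
  | zero => intro m A B _ _; simp [pvWB, pvDesc]
  | succ c ih =>
    intro m A B hA hc
    have h1 : A ++ List.replicate (c + 1) (0 : Int) ++ B
        = (A ++ [0]) ++ List.replicate c (0 : Int) ++ B := by
      simp [List.replicate_succ]
    simp only [pvWB]
    rw [List.range_succ, List.foldl_append, h1]
    have h2 := ih m (A ++ [0]) B (by simp; omega) (by omega)
    simp only [pvWB] at h2
    rw [h2]
    have hidx : m - c - 1 = A.length := by omega
    simp only [List.foldl_cons, List.foldl_nil, hidx, List.append_assoc]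
    rw [List.set_append_right _ _ (le_refl _)]
    simp [pvDesc]

-- invariant of A's inner loop after m iterations
theorem pvA_inv (row : List Int) (m : Nat) (hm : m ≤ row.length) :
    (List.range m).foldl (pvAStep row) (0, 0, 0, row) =
      ((row.take (m - 1)).getLastD 0, (row.take m).getLastD 0, pvTC (row.take m),
       pvRT (row.take (m - pvTC (row.take m))) 0
         ++ List.replicate (pvTC (row.take m)) 0 ++ row.drop m) := by
  induction m with
  | zero => simp [pvTC, pvRT]
  | succ m ih =>
    have hm' : m ≤ row.length := by omega
    have hlt : m < row.length := by omega
    have hget : row.getD m 0 = row[m] := List.getD_eq_getElem row 0 hlt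
    have htake : row.take (m + 1) = row.take m ++ [row[m]] := by
      rw [List.take_succ]
      simp [List.getElem?_eq_getElem hlt]
    have hdropm : row.drop m = row[m] :: row.drop (m + 1) :=
      List.drop_eq_getElem_cons hlt
    have htc : pvTC (row.take m) ≤ m := by
      have := pvTC_le (row.take m)
      simpa [List.length_take, Nat.min_eq_left hm'] using this
    set c := pvTC (row.take m) with hc
    have hPlen : (pvRT (row.take (m - c)) 0).length = m - c := by
      rw [pvRT_length, List.length_take]
      omega
    have hset : (pvRT (row.take (m - c)) 0 ++ List.replicate c 0 ++ row.drop m).set m 0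
        = pvRT (row.take (m - c)) 0 ++ List.replicate c 0 ++ (0 :: row.drop (m + 1)) := by
      rw [hdropm, List.append_assoc, List.set_append_right _ _ (by rw [hPlen]; omega),
        List.append_assoc]
      congr 1
      rw [List.set_append_right _ _ (by simp [hPlen]; omega)]
      congr 1
      simp only [hPlen, List.length_replicate]
      have hidx0 : m - (m - c) - c = 0 := by omega
      rw [hidx0]
      rfl
    have hlast : (row.take (m + 1)).getLastD 0 = row[m] := by
      rw [htake, List.getLastD_concat]
    have hsplit : pvRT (row.take m) 0 = pvRT (row.take (m - c)) 0 ++ pvDesc c := by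
      have h2 := pvRT_split (row.take m)
      rw [List.length_take, Nat.min_eq_left hm', ← hc, List.take_take,
        Nat.min_eq_left (by omega : m - c ≤ m)] at h2
      exact h2
    rw [List.range_succ, List.foldl_append, ih hm', List.foldl_cons, List.foldl_nil]
    simp only [pvAStep, hget]
    by_cases hv : row[m] = 0
    · have htc' : pvTC (row.take (m + 1)) = 0 := by
        rw [htake, hv, pvTC_append]
        simp
      by_cases hp : (row.take m).getLastD 0 = 0
      · -- current = 0, prev = 0 : nothing happens, count already 0
        have hc0 : c = 0 := (pvTC_zero_iff _).2 hp
        rw [if_neg (by simp [hv]), if_neg (fun h => h.2 hp), if_neg (by simp [hv]), hset]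
        simp only [Prod.mk.injEq]
        refine ⟨by simp, ?_, ?_, ?_⟩
        · rw [hlast, hv]
        · rw [htc', hc0]
        · rw [htc', hc0]
          simp only [Nat.sub_zero, List.replicate_zero, htake, hv, pvRT_append_zero]
          simp
      · -- current = 0, prev ≠ 0 : write back the finished run
        rw [if_neg (by simp [hv]), if_pos ⟨hv, hp⟩, hset]
        have hwb := pvWB_eq c m (pvRT (row.take (m - c)) 0) (0 :: row.drop (m + 1)) hPlen htc
        rw [hwb]
        simp only [Prod.mk.injEq]
        refine ⟨by simp, ?_, ?_, ?_⟩
        · rw [hlast, hv]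
        · rw [htc']
        · rw [htc']
          simp only [Nat.sub_zero, List.replicate_zero, htake, hv, pvRT_append_zero, hsplit]
          simp
    · have htc' : pvTC (row.take (m + 1)) = c + 1 := by
        rw [htake, pvTC_append, if_neg hv]
      have h4 : pvRT (row.take (m - c)) 0 ++ List.replicate c 0 ++ 0 :: row.drop (m + 1)
          = pvRT (row.take (m + 1 - (c + 1))) 0 ++ List.replicate (c + 1) 0
            ++ row.drop (m + 1) := by
        have he : m + 1 - (c + 1) = m - c := by omega
        rw [he, List.replicate_succ']
        simp
      by_cases hp : (row.take m).getLastD 0 = 0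
      · -- current ≠ 0, prev = 0 : count += 1
        rw [if_neg (fun h => h.2 hp), if_neg (by simp [hv]), if_pos ⟨hv, hp⟩, hset]
        simp only [Prod.mk.injEq]
        exact ⟨by simp, hlast.symm, htc'.symm, by rw [htc']; exact h4⟩
      · -- current ≠ 0, prev ≠ 0 : count += 1
        rw [if_pos ⟨hv, hp⟩, hset]
        simp only [Prod.mk.injEq]
        exact ⟨by simp, hlast.symm, htc'.symm, by rw [htc']; exact h4⟩

-- A's row result is the run-length-to-end labelling of the first n entries
theorem pvARow_eq (n : Nat) (row : List Int) (h : n ≤ row.length) :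
    pvARow n row = pvRT (row.take n) 0 ++ row.drop n := by
  unfold pvARow
  rw [pvA_inv row n h]
  dsimp only
  set c := pvTC (row.take n) with hc
  have htc : c ≤ n := by
    have := pvTC_le (row.take n)
    simpa [List.length_take, Nat.min_eq_left h] using this
  have hPlen : (pvRT (row.take (n - c)) 0).length = n - c := by
    rw [pvRT_length, List.length_take]
    omega
  by_cases hcur : (row.take n).getLastD 0 = 0
  · have hc0 : c = 0 := (pvTC_zero_iff _).2 hcur
    rw [if_neg (not_not_intro hcur), hc0]
    simp
  · rw [if_pos hcur, pvWB_eq c n _ _ hPlen htc]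
    have hsplit : pvRT (row.take n) 0 = pvRT (row.take (n - c)) 0 ++ pvDesc c := by
      have h2 := pvRT_split (row.take n)
      rw [List.length_take, Nat.min_eq_left h, ← hc, List.take_take,
        Nat.min_eq_left (by omega : n - c ≤ n)] at h2
      exact h2
    rw [hsplit]

-- B's backward fold computes the same labelling
theorem pvB_fold (l : List Int) :
    l.reverse.foldl
        (fun (p : Int × List Int) v =>
          let c := if v ≠ 0 then p.1 + 1 else (0 : Int)
          (c, p.2 ++ [c])) ((0 : Int), ([] : List Int))
      = ((pvRT l 0).headD 0, (pvRT l 0).reverse) := by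
  rw [List.foldl_reverse]
  induction l with
  | nil => rfl
  | cons v t ih =>
    rw [List.foldr_cons, ih]
    simp only [pvRT]
    by_cases hv : v = 0
    · simp [hv]
    · simp [hv]

theorem pvBRow_eq (n : Nat) (row : List Int) :
    pvBRow n row = pvRT (row.take n) 0 ++ row.drop n := by
  rw [pvBRow]
  simp only [pvB_fold]
  simp

-- A's outer loop (set each index of the copied matrix) is a map
theorem pvOuter (g : List Int → List Int) (x : List (List Int)) :
    ∀ m ≤ x.length,
      (List.range m).foldl (fun ret k => ret.set k (g (x.getD k []))) x
        = (x.take m).map g ++ x.drop m := by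
  intro m
  induction m with
  | zero => simp
  | succ m ih =>
    intro hm
    have hm' : m ≤ x.length := by omega
    have hlt : m < x.length := by omega
    have hget : x.getD m [] = x[m] := List.getD_eq_getElem x [] hlt
    have htake : x.take (m + 1) = x.take m ++ [x[m]] := by
      rw [List.take_succ]; simp [List.getElem?_eq_getElem hlt]
    have hdropm : x.drop m = x[m] :: x.drop (m + 1) := List.drop_eq_getElem_cons hlt
    have hlen : (List.map g (List.take m x)).length = m := by
      simp [Nat.min_eq_left hm']
    rw [List.range_succ, List.foldl_append, ih hm', List.foldl_cons, List.foldl_nil, hget,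
      List.set_append_right _ _ (by rw [hlen]), hlen, Nat.sub_self, hdropm,
      List.set_cons_zero, htake, List.map_append]
    simp

-- ===== VERDICT (by name: the statement is the Claim_ definition above) =====
theorem matBumperUp_spec : Claim_equal_matBumperUp := by
  intro x _ hpre
  unfold Spec_matBumperUp matBumperUp
  cases x with
  | nil => rfl
  | cons x0 t =>
    simp only [matBumperUp_alt, List.map_id', List.headD_cons]
    rw [pvOuter (pvARow x0.length) (x0 :: t) (x0 :: t).length (le_refl _)]
    simp only [List.take_length, List.drop_length, List.append_nil, List.headD_cons]
    apply List.map_congr_left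
    intro r hr
    have hlen : x0.length ≤ r.length := by
      have := hpre r hr
      simpa using this
    rw [pvARow_eq _ _ hlen, pvBRow_eq]
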